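-- pv_equiv track=rewrite | github.com/augustosouza8/tests-sei | src/sei_client/options.py | _parse_categorias
-- ===== SOURCE A (Python) =====
-- from typing import List, Optional, Set
--
-- def _parse_list_argument(cli_values: Optional[List[str]], env_value: Optional[str]) -> List[str]:
--     """Combina valores vindos da CLI e das variáveis de ambiente em uma lista."""
--     values: List[str] = []
--     if cli_values:
--         values.extend(cli_values)
--     elif env_value:
--         values.extend([item.strip() for item in env_value.split(",") if item.strip()])
--     return [v for v in (val.strip() for val in values) if v]
--
-- def _parse_categorias(cli_values: Optional[List[str]], env_value: Optional[str]) -> Optional[Set[str]]: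
--     """Normaliza categorias informadas pelo usuário, tratando sinônimos comuns."""
--     valores = _parse_list_argument(cli_values, env_value)
--     if not valores:
--         return None
--     categorias_map = {
--         "recebidos": "Recebidos",
--         "recebido": "Recebidos",
--         "gerados": "Gerados",
--         "gerado": "Gerados",
--         "todos": "TODOS",
--         "ambos": "TODOS",
--     }
--     categorias: Set[str] = set()
--     for valor in valores:
--         chave = valor.lower()
--         mapped = categorias_map.get(chave)
--         if mapped == "TODOS":
--             return None
--         if mapped in {"Recebidos", "Gerados"}:
--             categorias.add(mapped)
--     if not categorias or len(categorias) == 2: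
--         return None
--     return categorias
-- ===== SOURCE B (Python) =====
-- from typing import List, Optional, Set
--
-- _TODOS = {"todos", "ambos"}
-- _RECEBIDOS = {"recebidos", "recebido"}
-- _GERADOS = {"gerados", "gerado"}
--
-- def _parse_list_argument(cli_values: Optional[List[str]], env_value: Optional[str]) -> List[str]:
--     raw = cli_values if cli_values else (env_value.split(",") if env_value else [])
--     return [v for v in map(str.strip, raw) if v]
--
-- def _parse_categorias(cli_values: Optional[List[str]], env_value: Optional[str]) -> Optional[Set[str]]:
--     tokens = {v.lower() for v in _parse_list_argument(cli_values, env_value)}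
--     has_rec = not tokens.isdisjoint(_RECEBIDOS)
--     has_ger = not tokens.isdisjoint(_GERADOS)
--     if not tokens.isdisjoint(_TODOS) or has_rec == has_ger:
--         return None
--     return {"Recebidos"} if has_rec else {"Gerados"}
-- ===== Notes on version B (the rewrite author's own statement) =====
-- stated objective: simpler
-- what changed: Removes A's dict mapping and early-returning accumulating loop entirely: B lowercases the tokens into a set, computes three disjointness flags against fixed synonym sets (TODOS/Recebidos/Gerados), decides None by boolean logic (TODOS present or rec==ger) and returns a literal singleton set; the helper also drops A's double strip/filter pass.
import Mathlib
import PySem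

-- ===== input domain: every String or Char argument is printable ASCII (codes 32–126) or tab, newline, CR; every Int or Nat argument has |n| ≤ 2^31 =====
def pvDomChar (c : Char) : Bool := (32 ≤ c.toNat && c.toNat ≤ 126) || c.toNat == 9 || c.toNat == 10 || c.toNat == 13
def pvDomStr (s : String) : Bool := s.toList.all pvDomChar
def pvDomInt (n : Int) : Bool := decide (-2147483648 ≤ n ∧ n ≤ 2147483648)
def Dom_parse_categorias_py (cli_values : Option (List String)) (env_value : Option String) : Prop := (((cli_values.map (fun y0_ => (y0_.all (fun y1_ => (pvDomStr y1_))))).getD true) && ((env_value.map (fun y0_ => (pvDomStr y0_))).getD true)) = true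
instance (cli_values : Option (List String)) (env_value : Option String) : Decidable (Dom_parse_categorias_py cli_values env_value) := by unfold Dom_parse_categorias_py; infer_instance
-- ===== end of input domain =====

-- B drops A's dict mapping and accumulating loop entirely: it lowercases the tokens into a set,
-- computes three disjointness flags against fixed synonym sets, and decides by boolean logic,
-- returning a literal singleton; objective: simpler.

-- ===== PORT A =====
-- the literal categorias_map of A
def pvCategoriasMap : PySem.Dict String String :=
  PySem.Dict.mk [("recebidos", "Recebidos"), ("recebido", "Recebidos"),
   ("gerados", "Gerados"), ("gerado", "Gerados"),
   ("todos", "TODOS"), ("ambos", "TODOS")]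

-- A's _parse_list_argument: extend from CLI, elif from env (split, strip, filter), then strip+filter again.
-- env_value.split(",") is PySem.Str.split? with the nonempty literal separator ",", so .getD [] is exact.
def pvParseListArgumentA (cli_values : Option (List String)) (env_value : Option String) : List String :=
  let values : List String :=
    if cli_values.getD [] ≠ [] then cli_values.getD []
    else if env_value.getD "" ≠ "" then
      (((PySem.Str.split? (env_value.getD "") ",").getD []).filter
        (fun item => PySem.Str.strip item ≠ "")).map (fun item => PySem.Str.strip item)
    else []
  (values.map (fun val => PySem.Str.strip val)).filter (fun v => v ≠ "")

-- A's 'for valor in valores' loop with its early 'return None' on TODOS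
def pvLoopA : List String → PySem.Set String → Option (PySem.Set String)
  | [], categorias => some categorias
  | valor :: rest, categorias =>
    match pvCategoriasMap.get? (PySem.Str.lower valor) with
    | some mapped =>
      if mapped = "TODOS" then none
      else if mapped = "Recebidos" ∨ mapped = "Gerados" then pvLoopA rest (PySem.Set.add categorias mapped)
      else pvLoopA rest categorias
    | none => pvLoopA rest categorias

def parse_categorias_py (cli_values : Option (List String)) (env_value : Option String) : Option (List String) :=
  let valores := pvParseListArgumentA cli_values env_value
  if valores = [] then none
  else
    match pvLoopA valores PySem.Set.empty with
    | none => none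
    | some categorias =>
      if categorias = [] ∨ PySem.Set.len categorias = 2 then none else some categorias

-- ===== PORT B =====
-- B's _parse_list_argument: pick the raw list (CLI, else env split, else empty), one strip+filter pass.
def pvParseListArgumentB (cli_values : Option (List String)) (env_value : Option String) : List String :=
  let raw : List String :=
    if cli_values.getD [] ≠ [] then cli_values.getD []
    else if env_value.getD "" ≠ "" then (PySem.Str.split? (env_value.getD "") ",").getD []
    else []
  (raw.map (fun v => PySem.Str.strip v)).filter (fun v => v ≠ "")

-- B: set of lowered tokens, three isdisjoint flags against the fixed synonym sets, boolean decision
def parse_categorias_py_alt (cli_values : Option (List String)) (env_value : Option String) : Option (List String) :=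
  let tokens : PySem.Set String :=
    PySem.Set.ofList ((pvParseListArgumentB cli_values env_value).map (fun v => PySem.Str.lower v))
  let has_rec : Bool := !(PySem.Set.isdisjoint tokens ["recebidos", "recebido"])
  let has_ger : Bool := !(PySem.Set.isdisjoint tokens ["gerados", "gerado"])
  if !(PySem.Set.isdisjoint tokens ["todos", "ambos"]) || (has_rec == has_ger) then none
  else if has_rec then some ["Recebidos"] else some ["Gerados"]

-- ===== PRECONDITION & SPEC =====
def Spec_parse_categorias_py (cli_values : Option (List String)) (env_value : Option String) (out : Option (List String)) : Prop := out = parse_categorias_py_alt cli_values env_value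
instance (cli_values : Option (List String)) (env_value : Option String) (out : Option (List String)) : Decidable (Spec_parse_categorias_py cli_values env_value out) := by unfold Spec_parse_categorias_py; infer_instance

-- ===== CLAIM =====
def Claim_equal_parse_categorias_py : Prop := ∀ (cli_values : Option (List String)) (env_value : Option String), Dom_parse_categorias_py cli_values env_value → Spec_parse_categorias_py cli_values env_value (parse_categorias_py cli_values env_value)

-- ===== LEMMAS AND PROOFS =====

-- the "categorized token" read off a raw value
def pvTok (v : String) : Option String := pvCategoriasMap.get? (PySem.Str.lower v)

-- which tokens land in A's result set
def pvRG (v : String) : Option String :=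
  (pvTok v).bind (fun m =>
    if m = "TODOS" then none else if m = "Recebidos" ∨ m = "Gerados" then some m else none)

-- the dict lookup, written out as the synonym cases
theorem pvTok_eq (v : String) :
    pvTok v =
      (if PySem.Str.lower v = "recebidos" ∨ PySem.Str.lower v = "recebido" then some "Recebidos"
       else if PySem.Str.lower v = "gerados" ∨ PySem.Str.lower v = "gerado" then some "Gerados"
       else if PySem.Str.lower v = "todos" ∨ PySem.Str.lower v = "ambos" then some "TODOS"
       else none) := by
  unfold pvTok pvCategoriasMap
  rcases h1 : decide (PySem.Str.lower v = "recebidos") with _ | _ <;>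
  rcases h2 : decide (PySem.Str.lower v = "recebido") with _ | _ <;>
  rcases h3 : decide (PySem.Str.lower v = "gerados") with _ | _ <;>
  rcases h4 : decide (PySem.Str.lower v = "gerado") with _ | _ <;>
  rcases h5 : decide (PySem.Str.lower v = "todos") with _ | _ <;>
  rcases h6 : decide (PySem.Str.lower v = "ambos") with _ | _ <;>
  simp at h1 h2 h3 h4 h5 h6 <;>
  (simp [PySem.Dict.get?, h1, h2, h3, h4, h5, h6] <;>
    try exact ⟨fun h => h1 h.symm, fun h => h2 h.symm, fun h => h3 h.symm,
      fun h => h4 h.symm, fun h => h5 h.symm, fun h => h6 h.symm⟩)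

theorem pvLoopA_char (vs : List String) (acc : PySem.Set String) :
    pvLoopA vs acc =
      if ∃ v ∈ vs, pvTok v = some "TODOS" then none
      else some ((vs.filterMap pvRG).foldl PySem.Set.add acc) := by
  induction vs generalizing acc with
  | nil => simp [pvLoopA]
  | cons v rest ih =>
    have hst : pvLoopA (v :: rest) acc =
        match pvTok v with
        | some mapped =>
          if mapped = "TODOS" then none
          else if mapped = "Recebidos" ∨ mapped = "Gerados" then pvLoopA rest (PySem.Set.add acc mapped)
          else pvLoopA rest acc
        | none => pvLoopA rest acc := rfl
    rw [hst]
    cases h : pvTok v with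
    | none =>
      rw [ih]
      simp [pvRG, h]
    | some m =>
      show (if m = "TODOS" then none
        else if m = "Recebidos" ∨ m = "Gerados" then pvLoopA rest (PySem.Set.add acc m)
        else pvLoopA rest acc) = _
      by_cases ht : m = "TODOS"
      · subst ht
        simp [h]
      · rw [if_neg ht]
        by_cases hrg : m = "Recebidos" ∨ m = "Gerados"
        · rw [if_pos hrg, ih]
          simp [pvRG, h, ht, hrg]
        · rw [if_neg hrg, ih]
          simp [pvRG, h, ht, hrg]

theorem pv_singleton_of_nodup {α : Type} {l : List α} {a : α}
    (hnd : l.Nodup) (hmem : ∀ x, x ∈ l ↔ x = a) : l = [a] := by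
  cases l with
  | nil => exact absurd ((hmem a).mpr rfl) (by simp)
  | cons x xs =>
    have hx : x = a := (hmem x).mp (by simp)
    subst hx
    have hnx : x ∉ xs ∧ xs.Nodup := by simpa using hnd
    have hxs : xs = [] := by
      cases xs with
      | nil => rfl
      | cons y ys =>
        have hy : y = x := (hmem y).mp (by simp)
        exact absurd (by simp [hy] : x ∈ y :: ys) hnx.1
    simp [hxs]

theorem pv_pair_of_nodup {α : Type} {l : List α} {a b : α} (hab : a ≠ b)
    (hnd : l.Nodup) (hmem : ∀ x, x ∈ l ↔ x = a ∨ x = b) : l = [a, b] ∨ l = [b, a] := by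
  cases l with
  | nil => exact absurd ((hmem a).mpr (Or.inl rfl)) (by simp)
  | cons x xs =>
    have hnx : x ∉ xs ∧ xs.Nodup := by simpa using hnd
    rcases (hmem x).mp (by simp) with hx | hx
    · subst hx
      left
      have hxs : xs = [b] := by
        apply pv_singleton_of_nodup hnx.2
        intro y
        constructor
        · intro hy
          rcases (hmem y).mp (List.mem_cons_of_mem _ hy) with h | h
          · exact absurd (h ▸ hy) hnx.1
          · exact h
        · intro hy
          subst hy
          rcases List.mem_cons.mp ((hmem y).mpr (Or.inr rfl)) with h | h
          · exact absurd h.symm hab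
          · exact h
      simp [hxs]
    · subst hx
      right
      have hxs : xs = [a] := by
        apply pv_singleton_of_nodup hnx.2
        intro y
        constructor
        · intro hy
          rcases (hmem y).mp (List.mem_cons_of_mem _ hy) with h | h
          · exact h
          · exact absurd (h ▸ hy) hnx.1
        · intro hy
          subst hy
          rcases List.mem_cons.mp ((hmem y).mpr (Or.inl rfl)) with h | h
          · exact absurd h hab
          · exact h
      simp [hxs]

-- strip is idempotent (needed because A strips the env items twice)
theorem pv_chars_strip_strip (l : List Char) :
    PySem.Chars.strip (PySem.Chars.strip l) = PySem.Chars.strip l := by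
  simp only [PySem.Chars.strip, PySem.Chars.lstrip, PySem.Chars.rstrip]
  have hrd : ∀ x : List Char, (List.dropWhile PySem.Chars.isspace x.reverse).reverse
      = x.rdropWhile PySem.Chars.isspace := by
    intro x
    simp [List.rdropWhile]
  rw [hrd, hrd]
  have h1 : List.dropWhile PySem.Chars.isspace
      ((List.dropWhile PySem.Chars.isspace l).rdropWhile PySem.Chars.isspace)
      = (List.dropWhile PySem.Chars.isspace l).rdropWhile PySem.Chars.isspace := by
    rw [List.dropWhile_eq_self_iff]
    intro hl
    obtain ⟨hpre, hlen⟩ : (List.dropWhile PySem.Chars.isspace l).rdropWhile PySem.Chars.isspace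
        <+: List.dropWhile PySem.Chars.isspace l ∧ True := ⟨List.rdropWhile_prefix _ _, trivial⟩
    have hlt : 0 < (List.dropWhile PySem.Chars.isspace l).length :=
      lt_of_lt_of_le hl hpre.length_le
    have hget := hpre.getElem (i := 0) hl
    rw [hget]
    exact List.dropWhile_get_zero_not _ l hlt
  rw [h1, List.rdropWhile_idempotent]

theorem pv_strip_strip (s : String) :
    PySem.Str.strip (PySem.Str.strip s) = PySem.Str.strip s := by
  have h := pv_chars_strip_strip s.toList
  have hh : (PySem.Str.strip (PySem.Str.strip s)).toList = (PySem.Str.strip s).toList := by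
    simpa using h
  exact String.toList_inj.mp hh

-- A's second strip+filter pass over the env branch is a single pass over the stripped items
theorem pv_double_pass (X : List String) :
    ((X.filter (fun item => PySem.Str.strip item ≠ "")).map
        (fun item => PySem.Str.strip item)).filter (fun v => v ≠ "")
      = (X.map (fun val => PySem.Str.strip val)).filter (fun v => v ≠ "") := by
  induction X with
  | nil => rfl
  | cons x xs ih =>
    by_cases hx : PySem.Str.strip x = ""
    · simpa [hx] using ih
    · simpa [hx] using ih

-- the two _parse_list_argument variants agree
theorem pvPLA_eq (cli_values : Option (List String)) (env_value : Option String) :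
    pvParseListArgumentA cli_values env_value = pvParseListArgumentB cli_values env_value := by
  unfold pvParseListArgumentA pvParseListArgumentB
  simp only []
  split_ifs with h1 h2
  · rfl
  · have hcomp : ((fun val => PySem.Str.strip val) ∘ (fun item => PySem.Str.strip item))
        = (fun item : String => PySem.Str.strip item) := funext fun x => pv_strip_strip x
    rw [List.map_map, hcomp]
    exact pv_double_pass _
  · rfl

theorem pvRG_mem_cases {vs : List String} {x : String} (hx : x ∈ vs.filterMap pvRG) :
    x = "Recebidos" ∨ x = "Gerados" := by
  rw [List.mem_filterMap] at hx
  obtain ⟨v, _, hv⟩ := hx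
  cases h : pvTok v with
  | none => simp [pvRG, h] at hv
  | some m =>
    simp only [pvRG, h, Option.bind_some] at hv
    split_ifs at hv with hh1 hh2 ; simp_all

theorem pvRG_mem_iff (vs : List String) (s : String)
    (hs : s = "Recebidos" ∨ s = "Gerados") :
    s ∈ vs.filterMap pvRG ↔ ∃ v ∈ vs, pvTok v = some s := by
  rw [List.mem_filterMap]
  constructor
  · rintro ⟨v, hv, hrg⟩
    refine ⟨v, hv, ?_⟩
    cases h : pvTok v with
    | none => simp [pvRG, h] at hrg
    | some m =>
      simp only [pvRG, h, Option.bind_some] at hrg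
      split_ifs at hrg with hh1 hh2 ; simp_all
  · rintro ⟨v, hv, htok⟩
    refine ⟨v, hv, ?_⟩
    simp only [pvRG, htok, Option.bind_some]
    rcases hs with h | h <;> subst h <;> simp

-- B's flag for a pair of synonyms, read as an existence statement over the raw values
theorem pv_flag_iff (vs : List String) (a b : String) :
    (!(PySem.Set.isdisjoint (PySem.Set.ofList (vs.map (fun v => PySem.Str.lower v))) [a, b])) = true
      ↔ ∃ v ∈ vs, PySem.Str.lower v = a ∨ PySem.Str.lower v = b := by
  simp only [PySem.Set.isdisjoint, Bool.not_not, List.any_eq_true]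
  constructor
  · rintro ⟨x, hx, hc⟩
    have hx' := (PySem.Set.mem_ofList _ _).mp hx
    obtain ⟨v, hv, rfl⟩ := List.mem_map.mp hx'
    refine ⟨v, hv, ?_⟩
    have : PySem.Str.lower v ∈ ([a, b] : List String) := by
      simpa using (List.contains_iff_mem).mp hc
    simpa using this
  · rintro ⟨v, hv, hab⟩
    refine ⟨PySem.Str.lower v, (PySem.Set.mem_ofList _ _).mpr (List.mem_map.mpr ⟨v, hv, rfl⟩), ?_⟩
    apply List.contains_iff_mem.mpr
    rcases hab with h | h <;> simp [h]

theorem parse_categorias_py_spec : Claim_equal_parse_categorias_py := by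
  intro cv ev _
  unfold Spec_parse_categorias_py parse_categorias_py parse_categorias_py_alt
  simp only []
  rw [← pvPLA_eq]
  set vs := pvParseListArgumentA cv ev with hvs
  -- rewrite the three flags as existence statements over vs
  have hT := pv_flag_iff vs "todos" "ambos"
  have hR := pv_flag_iff vs "recebidos" "recebido"
  have hG := pv_flag_iff vs "gerados" "gerado"
  -- translate lowered-word conditions into pvTok values
  have hTtok : (∃ v ∈ vs, PySem.Str.lower v = "todos" ∨ PySem.Str.lower v = "ambos")
      ↔ ∃ v ∈ vs, pvTok v = some "TODOS" := by
    constructor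
    · rintro ⟨v, hv, h⟩
      exact ⟨v, hv, by rw [pvTok_eq]; rcases h with h | h <;> simp [h]⟩
    · rintro ⟨v, hv, h⟩
      refine ⟨v, hv, ?_⟩
      rw [pvTok_eq] at h
      split_ifs at h with h1 h2 h3 <;> simp_all
  have hRtok : (∃ v ∈ vs, PySem.Str.lower v = "recebidos" ∨ PySem.Str.lower v = "recebido")
      ↔ ∃ v ∈ vs, pvTok v = some "Recebidos" := by
    constructor
    · rintro ⟨v, hv, h⟩
      exact ⟨v, hv, by rw [pvTok_eq]; rcases h with h | h <;> simp [h]⟩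
    · rintro ⟨v, hv, h⟩
      refine ⟨v, hv, ?_⟩
      rw [pvTok_eq] at h
      split_ifs at h with h1 h2 h3 <;> simp_all
  have hGtok : (∃ v ∈ vs, PySem.Str.lower v = "gerados" ∨ PySem.Str.lower v = "gerado")
      ↔ ∃ v ∈ vs, pvTok v = some "Gerados" := by
    constructor
    · rintro ⟨v, hv, h⟩
      exact ⟨v, hv, by rw [pvTok_eq]; rcases h with h | h <;> simp [h]⟩
    · rintro ⟨v, hv, h⟩
      refine ⟨v, hv, ?_⟩
      rw [pvTok_eq] at h
      split_ifs at h with h1 h2 h3 <;> simp_all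
  by_cases htod : ∃ v ∈ vs, pvTok v = some "TODOS"
  · -- both sides are none
    have hTb : (!(PySem.Set.isdisjoint (PySem.Set.ofList (vs.map (fun v => PySem.Str.lower v)))
        ["todos", "ambos"])) = true := hT.mpr (hTtok.mpr htod)
    rw [hTb]
    simp only [Bool.true_or, if_true]
    by_cases hnil : vs = []
    · rw [if_pos hnil]
    · rw [if_neg hnil, pvLoopA_char, if_pos htod]
  · have hTb : (!(PySem.Set.isdisjoint (PySem.Set.ofList (vs.map (fun v => PySem.Str.lower v)))
        ["todos", "ambos"])) = false := by
      rw [Bool.eq_false_iff, Ne, hT]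
      exact fun h => htod (hTtok.mp h)
    rw [hTb]
    simp only [Bool.false_or]
    set L := vs.filterMap pvRG with hL
    have hRiff : "Recebidos" ∈ L ↔ ∃ v ∈ vs, pvTok v = some "Recebidos" :=
      pvRG_mem_iff vs _ (Or.inl rfl)
    have hGiff : "Gerados" ∈ L ↔ ∃ v ∈ vs, pvTok v = some "Gerados" :=
      pvRG_mem_iff vs _ (Or.inr rfl)
    have hndA : (PySem.Set.ofList L).Nodup := PySem.Set.nodup_ofList L
    by_cases hr : ∃ v ∈ vs, pvTok v = some "Recebidos" <;>
      by_cases hg : ∃ v ∈ vs, pvTok v = some "Gerados"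
    all_goals
      first
      | (have hRb : (!(PySem.Set.isdisjoint (PySem.Set.ofList (vs.map (fun v => PySem.Str.lower v)))
            ["recebidos", "recebido"])) = true := hR.mpr (hRtok.mpr hr))
      | (have hRb : (!(PySem.Set.isdisjoint (PySem.Set.ofList (vs.map (fun v => PySem.Str.lower v)))
            ["recebidos", "recebido"])) = false := by
          rw [Bool.eq_false_iff, Ne, hR]; exact fun h => hr (hRtok.mp h))
    all_goals
      first
      | (have hGb : (!(PySem.Set.isdisjoint (PySem.Set.ofList (vs.map (fun v => PySem.Str.lower v)))
            ["gerados", "gerado"])) = true := hG.mpr (hGtok.mpr hg))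
      | (have hGb : (!(PySem.Set.isdisjoint (PySem.Set.ofList (vs.map (fun v => PySem.Str.lower v)))
            ["gerados", "gerado"])) = false := by
          rw [Bool.eq_false_iff, Ne, hG]; exact fun h => hg (hGtok.mp h))
    all_goals rw [hRb, hGb]
    · -- both present: A's set has length 2, B: flags equal → none
      simp only [beq_self_eq_true, if_true]
      have hvne : vs ≠ [] := by
        obtain ⟨v, hv, _⟩ := hr
        exact fun h => by simp [h] at hv
      rw [if_neg hvne, pvLoopA_char, if_neg htod]
      rw [show PySem.Set.empty = ([] : List String) from rfl, ← PySem.Set.ofList_eq_foldl]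
      have hmemL : ∀ x, x ∈ PySem.Set.ofList L ↔ x = "Recebidos" ∨ x = "Gerados" := by
        intro x
        rw [PySem.Set.mem_ofList]
        constructor
        · exact fun hx => pvRG_mem_cases hx
        · rintro (rfl | rfl)
          · exact hRiff.mpr hr
          · exact hGiff.mpr hg
      have hA : PySem.Set.ofList L = ["Recebidos", "Gerados"] ∨
          PySem.Set.ofList L = ["Gerados", "Recebidos"] := by
        refine pv_pair_of_nodup (by decide) hndA ?_
        intro x
        rw [← hmemL x]
      rcases hA with hA | hA <;> rw [hA] <;> simp [PySem.Set.len]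
    · -- only Recebidos
      simp only [Bool.true_eq_false, beq_iff_eq, if_false, if_true]
      have hvne : vs ≠ [] := by
        obtain ⟨v, hv, _⟩ := hr
        exact fun h => by simp [h] at hv
      rw [if_neg hvne, pvLoopA_char, if_neg htod]
      rw [show PySem.Set.empty = ([] : List String) from rfl, ← PySem.Set.ofList_eq_foldl]
      have hA : PySem.Set.ofList L = ["Recebidos"] := by
        refine pv_singleton_of_nodup hndA ?_
        intro x
        rw [PySem.Set.mem_ofList]
        constructor
        · intro hx
          rcases pvRG_mem_cases hx with h | h
          · exact h
          · exact absurd (hGiff.mp (h ▸ hx)) hg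
        · rintro rfl
          exact hRiff.mpr hr
      rw [hA]
      simp [PySem.Set.len]
    · -- only Gerados
      simp only [Bool.false_eq_true, beq_iff_eq, if_false]
      have hvne : vs ≠ [] := by
        obtain ⟨v, hv, _⟩ := hg
        exact fun h => by simp [h] at hv
      rw [if_neg hvne, pvLoopA_char, if_neg htod]
      rw [show PySem.Set.empty = ([] : List String) from rfl, ← PySem.Set.ofList_eq_foldl]
      have hA : PySem.Set.ofList L = ["Gerados"] := by
        refine pv_singleton_of_nodup hndA ?_
        intro x
        rw [PySem.Set.mem_ofList]
        constructor
        · intro hx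
          rcases pvRG_mem_cases hx with h | h
          · exact absurd (hRiff.mp (h ▸ hx)) hr
          · exact h
        · rintro rfl
          exact hGiff.mpr hg
      rw [hA]
      simp [PySem.Set.len]
    · -- neither: A's set is empty → none
      simp only [beq_self_eq_true, if_true]
      by_cases hnil : vs = []
      · rw [if_pos hnil]
      · rw [if_neg hnil, pvLoopA_char, if_neg htod]
        have hA : L = [] := by
          rw [List.eq_nil_iff_forall_not_mem]
          intro x hx
          rcases pvRG_mem_cases hx with h | h
          · exact hr (hRiff.mp (h ▸ hx))
          · exact hg (hGiff.mp (h ▸ hx))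
        rw [← hL, hA]
        simp [PySem.Set.empty, PySem.Set.len]
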